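-- pv_equiv track=rewrite | github.com/Dulmin2021/AffiCodes-Hacktoberfest2024 | prime-array.py | check
-- ===== SOURCE A (Python) =====
-- import math
--
-- def is_prime(n: int) -> bool:
-- 	# Check if n = 1 or n = 0
-- 	if n <= 1:
-- 		return False
--
-- 	# Check if n = 2 or n = 3
-- 	if n == 2 or n == 3:
-- 		return True
--
-- 	# Check whether n is divisible by 2 or 3
-- 	if n % 2 == 0 or n % 3 == 0:
-- 		return False
--
-- 	# Check from 5 to square root of n
-- 	# Iterate i by (i + 6)
-- 	for i in range(5, int(math.sqrt(n))+1, 6):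
-- 		if n % i == 0 or n % (i + 2) == 0:
-- 			return False
--
-- 	return True
--
-- def check(arr, n):
-- 	# Store all possible non-prime indxes
-- 	non_prime_numbers = []
-- 	for i in range(2, n + 1):
-- 		if(not is_prime(i)):
-- 			non_prime_numbers.append(i)
-- 	np = len(non_prime_numbers)
--
-- 	# Iterate over range n
-- 	for i in range(n):
--
-- 		# Check if prime or not
-- 		if(is_prime(arr[i])):
--
-- 			# If lowest value of non-prime number is
-- 			# out of the range for current index
-- 			# then we don't have to calculate
-- 			# for the remainings
-- 			if ((i + 3) >= n):
-- 				break
--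
-- 			j = 0
--
-- 			# Check for prme numbers in non-prime
-- 			# indexesas per current index i
-- 			while(j < np and (i + non_prime_numbers[j]-1) < n):
-- 				if(not is_prime(arr[i + non_prime_numbers[j]-1])):
-- 					return False
-- 				j += 1
--
-- 	return True
-- ===== SOURCE B (Python) =====
-- import math
--
-- def _is_prime(m):
--     if m < 2:
--         return False
--     for d in range(2, math.isqrt(m) + 1):
--         if m % d == 0:
--             return False
--     return True
--
-- def check(arr, n):
--     for i in range(n):
--         if _is_prime(arr[i]):
--             for k in range(i + 3, n):
--                 if not _is_prime(k - i + 1) and not _is_prime(arr[k]):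
--                     return False
--     return True
-- ===== Notes on version B (the rewrite author's own statement) =====
-- stated objective: simpler
-- what changed: B drops A's precomputed non-prime table, its break shortcut and its 6k+-1 wheel primality test: for each prime arr[i] it scans k from i+3 to n-1 directly, testing the gap k-i+1 for non-primality inline with a plain trial-division is_prime.
-- outside the precondition, e.g. on check([2], 3): A returns True, B raises IndexError
import Mathlib
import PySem

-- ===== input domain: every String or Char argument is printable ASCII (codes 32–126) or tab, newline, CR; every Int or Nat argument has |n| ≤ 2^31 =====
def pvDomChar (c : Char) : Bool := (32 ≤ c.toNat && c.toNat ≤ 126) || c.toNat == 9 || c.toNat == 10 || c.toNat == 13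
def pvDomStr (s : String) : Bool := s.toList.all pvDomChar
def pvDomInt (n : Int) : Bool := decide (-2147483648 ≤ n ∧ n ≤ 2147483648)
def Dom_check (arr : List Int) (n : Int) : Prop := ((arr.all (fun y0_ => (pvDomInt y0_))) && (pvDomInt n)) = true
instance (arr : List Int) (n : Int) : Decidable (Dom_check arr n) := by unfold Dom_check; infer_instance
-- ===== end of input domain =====

-- B drops A's precomputed non-prime table, break shortcut and 6k±1 wheel primality loop,
-- scanning k from i+3 to n-1 directly with a plain trial-division primality test (objective: simpler).

-- ===== PORT A =====
-- 'for i in range(5, int(math.sqrt(n))+1, 6): if n % i == 0 or n % (i+2) == 0: return False'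
def isPrimeALoop (n : Int) : List Int → Bool
  | [] => true
  | i :: rest =>
    if PySem.Int.mod n i == 0 || PySem.Int.mod n (i + 2) == 0 then false
    else isPrimeALoop n rest

-- is_prime of A.  int(math.sqrt(n)) is ported as Nat.sqrt n.toNat: exact on Dom (here 3 < n ≤ 2^31),
-- where the correctly-rounded math.sqrt truncates to the integer square root.
def isPrimeA (n : Int) : Bool :=
  if n ≤ 1 then false
  else if n == 2 || n == 3 then true
  else if PySem.Int.mod n 2 == 0 || PySem.Int.mod n 3 == 0 then false
  else isPrimeALoop n (PySem.List.pyRange 5 ((Nat.sqrt n.toNat : Int) + 1) 6)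

-- the 'while j < np and (i + non_prime_numbers[j]-1) < n' loop, as recursion on the table suffix
-- (arr[...] as pyGetD: Pre_check rules out IndexError)
def aInner (arr : List Int) (n i : Int) : List Int → Bool
  | [] => true
  | v :: rest =>
    if i + v - 1 < n then
      if !(isPrimeA (PySem.List.pyGetD arr (i + v - 1) 0)) then false
      else aInner arr n i rest
    else true

-- the 'for i in range(n)' loop with its break and early return
def aOuter (arr nps : List Int) (n : Int) : List Int → Bool
  | [] => true
  | i :: rest =>
    if isPrimeA (PySem.List.pyGetD arr i 0) then
      if i + 3 ≥ n then true
      else if aInner arr n i nps then aOuter arr nps n rest else false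
    else aOuter arr nps n rest

def check (arr : List Int) (n : Int) : Bool :=
  aOuter arr
    ((PySem.List.pyRange 2 (n + 1) 1).foldl
      (fun acc i => if !(isPrimeA i) then acc ++ [i] else acc) [])
    n (PySem.List.pyRange 0 n 1)

-- ===== PORT B =====
-- 'for d in range(2, math.isqrt(m) + 1): if m % d == 0: return False'
def primeBLoop (m : Int) : List Int → Bool
  | [] => true
  | d :: rest => if PySem.Int.mod m d == 0 then false else primeBLoop m rest

def primeB (m : Int) : Bool :=
  if m < 2 then false
  else primeBLoop m (PySem.List.pyRange 2 ((Nat.sqrt m.toNat : Int) + 1) 1)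

-- 'for k in range(i+3, n): if not _is_prime(k-i+1) and not _is_prime(arr[k]): return False'
def bInner (arr : List Int) (i : Int) : List Int → Bool
  | [] => true
  | k :: rest =>
    if !(primeB (k - i + 1)) && !(primeB (PySem.List.pyGetD arr k 0)) then false
    else bInner arr i rest

def bOuter (arr : List Int) (n : Int) : List Int → Bool
  | [] => true
  | i :: rest =>
    if primeB (PySem.List.pyGetD arr i 0) then
      if bInner arr i (PySem.List.pyRange (i + 3) n 1) then bOuter arr n rest else false
    else bOuter arr n rest

def check_alt (arr : List Int) (n : Int) : Bool :=
  bOuter arr n (PySem.List.pyRange 0 n 1)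

-- ===== PRECONDITION & SPEC =====
-- Pre_ excludes n > len(arr): there A may raise IndexError, or return a value only because its
-- break / early return happens to fire before the out-of-range access (an accident of A's scan order);
-- B raises IndexError on such inputs.
def Pre_check (arr : List Int) (n : Int) : Prop := n ≤ (arr.length : Int)
instance (arr : List Int) (n : Int) : Decidable (Pre_check arr n) := by unfold Pre_check; infer_instance
def pvWitness_check : List Int × Int := ([2, 4, 7, 9, 11], 5)

def Spec_check (arr : List Int) (n : Int) (out : Bool) : Prop := out = check_alt arr n
instance (arr : List Int) (n : Int) (out : Bool) : Decidable (Spec_check arr n out) := by unfold Spec_check; infer_instance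

-- ===== CLAIM (what is proved, stated in full; the proofs are below) =====
def Claim_equal_check : Prop := ∀ (arr : List Int) (n : Int), Dom_check arr n → Pre_check arr n → Spec_check arr n (check arr n)

-- ===== LEMMAS AND PROOFS =====

-- Both primality loops characterised, both tests shown to decide Nat.Prime, hence equal;
-- then the table-driven scan and the direct scan are matched position by position (k = i + v - 1).

theorem primeBLoop_iff (m : Int) (l : List Int) :
    primeBLoop m l = true ↔ ∀ d ∈ l, ¬ (d ∣ m) := by
  induction l with
  | nil => simp [primeBLoop]
  | cons d rest ih =>
    simp only [primeBLoop, List.forall_mem_cons]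
    by_cases h : d ∣ m
    · simp [(PySem.Int.mod_eq_zero_iff_dvd m d).mpr h, h]
    · simp [show ¬ PySem.Int.mod m d = 0 from fun hh => h ((PySem.Int.mod_eq_zero_iff_dvd m d).mp hh),
            h, ih]

theorem isPrimeALoop_iff (m : Int) (l : List Int) :
    isPrimeALoop m l = true ↔ ∀ i ∈ l, ¬ (i ∣ m) ∧ ¬ ((i + 2) ∣ m) := by
  induction l with
  | nil => simp [isPrimeALoop]
  | cons i rest ih =>
    simp only [isPrimeALoop, List.forall_mem_cons]
    by_cases h1 : i ∣ m
    · simp [(PySem.Int.mod_eq_zero_iff_dvd m i).mpr h1, h1]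
    · by_cases h2 : (i + 2) ∣ m
      · simp [(PySem.Int.mod_eq_zero_iff_dvd m (i + 2)).mpr h2, h2]
      · simp [show ¬ PySem.Int.mod m i = 0 from fun hh => h1 ((PySem.Int.mod_eq_zero_iff_dvd m i).mp hh),
              show ¬ PySem.Int.mod m (i + 2) = 0 from fun hh => h2 ((PySem.Int.mod_eq_zero_iff_dvd m (i + 2)).mp hh),
              h1, h2, ih]

theorem primeB_iff_prime (m : Int) (hm : 2 ≤ m) :
    primeB m = true ↔ Nat.Prime m.toNat := by
  rw [primeB, if_neg (by omega : ¬ m < 2), primeBLoop_iff]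
  constructor
  · intro h
    rw [Nat.prime_def_le_sqrt]
    refine ⟨by omega, fun d hd2 hds hdvd => ?_⟩
    have hmem : (d : Int) ∈ PySem.List.pyRange 2 ((Nat.sqrt m.toNat : Int) + 1) 1 := by
      rw [PySem.List.mem_pyRange_one]
      exact ⟨by omega, by omega⟩
    refine h _ hmem ?_
    have hmm : ((m.toNat : Int)) = m := Int.toNat_of_nonneg (by omega)
    rw [← hmm]
    exact_mod_cast hdvd
  · intro hp d hdmem hdvd
    rw [PySem.List.mem_pyRange_one] at hdmem
    obtain ⟨hd2, hdlt⟩ := hdmem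
    have hdn : d.toNat ∣ m.toNat := by
      have h' : ((d.toNat : Int)) ∣ ((m.toNat : Int)) := by
        rw [Int.toNat_of_nonneg (by omega : (0:Int) ≤ d), Int.toNat_of_nonneg (by omega : (0:Int) ≤ m)]
        exact hdvd
      exact_mod_cast h'
    exact (Nat.prime_def_le_sqrt.mp hp).2 d.toNat (by omega) (by omega) hdn

theorem wheel_iff (m : Int) (hm : 4 ≤ m) (h2 : ¬ (2:Int) ∣ m) (h3 : ¬ (3:Int) ∣ m) :
    (isPrimeALoop m (PySem.List.pyRange 5 ((Nat.sqrt m.toNat : Int) + 1) 6) = true) ↔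
      Nat.Prime m.toNat := by
  rw [isPrimeALoop_iff]
  have hdvd_int : ∀ q : Nat, q ∣ m.toNat → (q : Int) ∣ m := by
    intro q hq
    have h' : ((q : Int)) ∣ ((m.toNat : Int)) := by exact_mod_cast hq
    rwa [Int.toNat_of_nonneg (by omega)] at h'
  have hss : Nat.sqrt m.toNat * Nat.sqrt m.toNat ≤ m.toNat := by
    have := Nat.sqrt_le' m.toNat
    rwa [pow_two] at this
  constructor
  · intro h
    by_contra hnp
    have hpful : (m.toNat).minFac.Prime := Nat.minFac_prime (by omega)
    have hpd : (m.toNat).minFac ∣ m.toNat := Nat.minFac_dvd _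
    have hsq : (m.toNat).minFac * (m.toNat).minFac ≤ m.toNat := by
      have := Nat.minFac_sq_le_self (n := m.toNat) (by omega) hnp
      rwa [pow_two] at this
    have hps : (m.toNat).minFac ≤ Nat.sqrt m.toNat := Nat.le_sqrt.mpr hsq
    have hp2 : (m.toNat).minFac ≠ 2 := fun he => h2 (hdvd_int 2 (he ▸ hpd))
    have hp3 : (m.toNat).minFac ≠ 3 := fun he => h3 (hdvd_int 3 (he ▸ hpd))
    have hp4 : (m.toNat).minFac ≠ 4 := by
      intro he; rw [he] at hpful; exact absurd hpful (by decide)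
    have hp5 : 5 ≤ (m.toNat).minFac := by have := hpful.two_le; omega
    have hmod : (m.toNat).minFac % 6 = 1 ∨ (m.toNat).minFac % 6 = 5 := by
      have hd2 : ¬ 2 ∣ (m.toNat).minFac := fun hdp => h2 (hdvd_int 2 (hdp.trans hpd))
      have hd3 : ¬ 3 ∣ (m.toNat).minFac := fun hdp => h3 (hdvd_int 3 (hdp.trans hpd))
      omega
    rcases hmod with h1 | h5
    · have hmem : (((m.toNat).minFac : Int) - 2) ∈
          PySem.List.pyRange 5 ((Nat.sqrt m.toNat : Int) + 1) 6 := by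
        rw [PySem.List.mem_pyRange_iff_of_pos (by norm_num)]
        refine ⟨by omega, by omega, by omega⟩
      refine (h _ hmem).2 ?_
      rw [show (((m.toNat).minFac : Int) - 2) + 2 = ((m.toNat).minFac : Int) by ring]
      exact hdvd_int _ hpd
    · have hmem : (((m.toNat).minFac : Int)) ∈
          PySem.List.pyRange 5 ((Nat.sqrt m.toNat : Int) + 1) 6 := by
        rw [PySem.List.mem_pyRange_iff_of_pos (by norm_num)]
        refine ⟨by omega, by omega, by omega⟩
      exact (h _ hmem).1 (hdvd_int _ hpd)
  · intro hp i hi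
    rw [PySem.List.mem_pyRange_iff_of_pos (by norm_num)] at hi
    obtain ⟨hi5, hilt, -⟩ := hi
    have h5s : 5 * Nat.sqrt m.toNat ≤ m.toNat :=
      le_trans (Nat.mul_le_mul_right _ (by omega)) hss
    constructor
    · intro hdvd
      have hin : i.toNat ∣ m.toNat := by
        have h' : ((i.toNat : Int)) ∣ ((m.toNat : Int)) := by
          rw [Int.toNat_of_nonneg (by omega : (0:Int) ≤ i), Int.toNat_of_nonneg (by omega : (0:Int) ≤ m)]
          exact hdvd
        exact_mod_cast h'
      rcases hp.eq_one_or_self_of_dvd _ hin with he | he <;> omega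
    · intro hdvd
      have hin : (i + 2).toNat ∣ m.toNat := by
        have h' : (((i + 2).toNat : Int)) ∣ ((m.toNat : Int)) := by
          rw [Int.toNat_of_nonneg (by omega : (0:Int) ≤ i + 2), Int.toNat_of_nonneg (by omega : (0:Int) ≤ m)]
          exact hdvd
        exact_mod_cast h'
      rcases hp.eq_one_or_self_of_dvd _ hin with he | he <;> omega

theorem isPrimeA_eq_primeB (m : Int) : isPrimeA m = primeB m := by
  by_cases h1 : m ≤ 1
  · rw [isPrimeA, if_pos h1, primeB, if_pos (by omega)]
  · by_cases h2m : m = 2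
    · subst h2m
      rw [show primeB 2 = true from (primeB_iff_prime 2 (by norm_num)).mpr Nat.prime_two]
      simp [isPrimeA]
    · by_cases h3m : m = 3
      · subst h3m
        rw [show primeB 3 = true from (primeB_iff_prime 3 (by norm_num)).mpr Nat.prime_three]
        simp [isPrimeA]
      · have hm4 : 4 ≤ m := by omega
        rw [isPrimeA, if_neg h1, if_neg (by simp [h2m, h3m])]
        by_cases hd : (2:Int) ∣ m ∨ (3:Int) ∣ m
        · have hA : (PySem.Int.mod m 2 == 0 || PySem.Int.mod m 3 == 0) = true := by
            simp only [Bool.or_eq_true, beq_iff_eq, PySem.Int.mod_eq_zero_iff_dvd]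
            exact hd
          rw [if_pos hA]
          cases hB : primeB m with
          | false => rfl
          | true =>
            exfalso
            have hp := (primeB_iff_prime m (by omega)).mp hB
            rcases hd with h | h
            · have hdn : (2:Nat) ∣ m.toNat := by
                have h' : ((2:Int)) ∣ ((m.toNat : Int)) := by
                  rwa [Int.toNat_of_nonneg (by omega : (0:Int) ≤ m)]
                exact_mod_cast h'
              rcases hp.eq_one_or_self_of_dvd 2 hdn with he | he <;> omega
            · have hdn : (3:Nat) ∣ m.toNat := by
                have h' : ((3:Int)) ∣ ((m.toNat : Int)) := by
                  rwa [Int.toNat_of_nonneg (by omega : (0:Int) ≤ m)]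
                exact_mod_cast h'
              rcases hp.eq_one_or_self_of_dvd 3 hdn with he | he <;> omega
        · have hnd2 : ¬ (2:Int) ∣ m := fun h => hd (Or.inl h)
          have hnd3 : ¬ (3:Int) ∣ m := fun h => hd (Or.inr h)
          rw [if_neg (by
            simp only [Bool.or_eq_true, beq_iff_eq, PySem.Int.mod_eq_zero_iff_dvd]
            exact fun hc => hc.elim hnd2 hnd3)]
          rw [Bool.eq_iff_iff, wheel_iff m hm4 hnd2 hnd3, primeB_iff_prime m (by omega)]

theorem bInner_iff (arr : List Int) (i : Int) (l : List Int) :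
    bInner arr i l = true ↔
      ∀ k ∈ l, primeB (k - i + 1) = false → primeB (PySem.List.pyGetD arr k 0) = true := by
  induction l with
  | nil => simp [bInner]
  | cons k rest ih =>
    simp only [bInner, List.forall_mem_cons]
    cases hp : primeB (k - i + 1) with
    | false =>
      cases hq : primeB (PySem.List.pyGetD arr k 0) with
      | false => simp
      | true => simp [ih]
    | true => simp [ih]

theorem aInner_iff (arr : List Int) (n i : Int) (l : List Int)
    (hs : l.Pairwise (· ≤ ·)) :
    aInner arr n i l = true ↔
      ∀ v ∈ l, i + v - 1 < n → isPrimeA (PySem.List.pyGetD arr (i + v - 1) 0) = true := by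
  induction hs with
  | nil => simp [aInner]
  | @cons v rest hv _ ih =>
    simp only [aInner, List.forall_mem_cons]
    by_cases hlt : i + v - 1 < n
    · rw [if_pos hlt]
      cases hq : isPrimeA (PySem.List.pyGetD arr (i + v - 1) 0) with
      | false => simp [hlt]
      | true => simp [hlt, ih]
    · rw [if_neg hlt]
      constructor
      · intro _
        refine ⟨fun hvn => absurd hvn hlt, fun x hx hxn => absurd hxn ?_⟩
        have := hv x hx
        omega
      · intro _; rfl

theorem inner_bridge (arr : List Int) (n i : Int) (hi : 0 ≤ i) :
    aInner arr n i ((PySem.List.pyRange 2 (n + 1) 1).filter (fun v => !(isPrimeA v)))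
      = bInner arr i (PySem.List.pyRange (i + 3) n 1) := by
  have hpair : ((PySem.List.pyRange 2 (n + 1) 1).filter (fun v => !(isPrimeA v))).Pairwise (· ≤ ·) :=
    List.Pairwise.filter _ ((PySem.List.pairwise_lt_pyRange_one 2 (n + 1)).imp (fun h => le_of_lt h))
  rw [Bool.eq_iff_iff, aInner_iff arr n i _ hpair, bInner_iff]
  constructor
  · intro h k hk hkf
    obtain ⟨hk1, hk2⟩ := PySem.List.mem_pyRange_one.mp hk
    have hv : (k - i + 1) ∈ (PySem.List.pyRange 2 (n + 1) 1).filter (fun v => !(isPrimeA v)) := by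
      rw [List.mem_filter]
      refine ⟨PySem.List.mem_pyRange_one.mpr ⟨by omega, by omega⟩, ?_⟩
      simp [isPrimeA_eq_primeB, hkf]
    have hh := h _ hv (by omega)
    rw [isPrimeA_eq_primeB, show i + (k - i + 1) - 1 = k by ring] at hh
    exact hh
  · intro h v hv hlt
    rw [List.mem_filter] at hv
    obtain ⟨hvr, hvp⟩ := hv
    obtain ⟨hv2, hvn⟩ := PySem.List.mem_pyRange_one.mp hvr
    have hvf : primeB v = false := by
      rw [← isPrimeA_eq_primeB]
      simpa using hvp
    have hv4 : 4 ≤ v := by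
      by_contra hc
      have : v = 2 ∨ v = 3 := by omega
      rcases this with rfl | rfl
      · rw [show primeB 2 = true from (primeB_iff_prime 2 (by norm_num)).mpr Nat.prime_two] at hvf
        simp at hvf
      · rw [show primeB 3 = true from (primeB_iff_prime 3 (by norm_num)).mpr Nat.prime_three] at hvf
        simp at hvf
    have hk : i + v - 1 ∈ PySem.List.pyRange (i + 3) n 1 :=
      PySem.List.mem_pyRange_one.mpr ⟨by omega, by omega⟩
    have hh := h _ hk (by rw [show i + v - 1 - i + 1 = v by ring]; exact hvf)
    rw [isPrimeA_eq_primeB]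
    exact hh

theorem bOuter_true_of (arr : List Int) (n : Int) (l : List Int)
    (h : ∀ j ∈ l, n ≤ j + 3) : bOuter arr n l = true := by
  induction l with
  | nil => simp [bOuter]
  | cons j rest ih =>
    simp only [bOuter]
    rw [PySem.List.pyRange_one_eq_nil (by have := h j (List.mem_cons_self ..); omega)]
    have hr := ih (fun x hx => h x (List.mem_cons_of_mem _ hx))
    simp [bInner, hr]

theorem outer_eq (arr : List Int) (n : Int) (l : List Int)
    (hs : l.Pairwise (· ≤ ·)) (hnn : ∀ j ∈ l, 0 ≤ j) :
    aOuter arr ((PySem.List.pyRange 2 (n + 1) 1).filter (fun v => !(isPrimeA v))) n l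
      = bOuter arr n l := by
  induction hs with
  | nil => simp [aOuter, bOuter]
  | @cons i rest hv _ ih =>
    have hi : 0 ≤ i := hnn i (List.mem_cons_self ..)
    have ih' := ih (fun x hx => hnn x (List.mem_cons_of_mem _ hx))
    simp only [aOuter, bOuter]
    rw [isPrimeA_eq_primeB]
    cases hp : primeB (PySem.List.pyGetD arr i 0) with
    | false => simp [ih']
    | true =>
      by_cases hb : i + 3 ≥ n
      · rw [show PySem.List.pyRange (i + 3) n 1 = [] from PySem.List.pyRange_one_eq_nil (by omega)]
        have hrest : bOuter arr n rest = true :=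
          bOuter_true_of arr n rest (fun j hj => by have := hv j hj; omega)
        simp [bInner, hb, hrest]
      · rw [inner_bridge arr n i hi]
        simp [hb, ih']

-- ===== VERDICT (by name: the statement is the Claim_ definition above) =====
theorem check_spec : Claim_equal_check := by
  intro arr n _ _
  unfold Spec_check check check_alt
  rw [PySem.List.foldl_append_if_eq_filter]
  rw [List.nil_append]
  apply outer_eq
  · exact (PySem.List.pairwise_lt_pyRange_one 0 n).imp (fun h => le_of_lt h)
  · intro j hj
    exact ((PySem.List.mem_pyRange_one).mp hj).1
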